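-- pv_equiv track=rewrite | github.com/lukisch/bach | system/tools/project/pattern_tool.py | find_suffix_patterns
-- ===== SOURCE A (Python) =====
-- from collections import defaultdict
--
-- def find_suffix_patterns(names: list, min_len: int = 3) -> dict:
--     """Findet gemeinsame Suffixe (vor Extension)."""
--     suffix_groups = defaultdict(list)
--
--     for i, name1 in enumerate(names):
--         for j, name2 in enumerate(names):
--             if i >= j:
--                 continue
--
--             # Reversed vergleichen
--             suffix = ""
--             for c1, c2 in zip(reversed(name1), reversed(name2)):
--                 if c1 == c2:
--                     suffix = c1 + suffix
--                 else:
--                     break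
--
--             if len(suffix) >= min_len:
--                 for k, name in enumerate(names):
--                     if name.endswith(suffix):
--                         if k not in suffix_groups[suffix]:
--                             suffix_groups[suffix].append(k)
--
--     return {s: idx for s, idx in suffix_groups.items() if len(idx) >= 2}
-- ===== SOURCE B (Python) =====
-- def find_suffix_patterns(names: list, min_len: int = 3) -> dict:
--     """Findet gemeinsame Suffixe (vor Extension)."""
--     # Collect each distinct qualifying common suffix once, in pair-discovery order.
--     # A common suffix can never be longer than either name, so names shorter than
--     # min_len are skipped outright.
--     suffixes = {}
--     for i, name1 in enumerate(names):
--         if len(name1) < min_len: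
--             continue
--         for name2 in names[i + 1:]:
--             if len(name2) < min_len:
--                 continue
--             n = 0
--             for c1, c2 in zip(reversed(name1), reversed(name2)):
--                 if c1 != c2:
--                     break
--                 n += 1
--             if n < min_len:
--                 continue
--             suffixes[name1[len(name1) - n:]] = None
--     # One scan over the names per distinct suffix.
--     result = {}
--     for s in suffixes:
--         idx = [k for k, name in enumerate(names) if name.endswith(s)]
--         if len(idx) >= 2:
--             result[s] = idx
--     return result
-- ===== Notes on version B (the rewrite author's own statement) =====
-- stated objective: faster
-- what changed: B skips names shorter than min_len outright (a common suffix cannot be longer than either name), dedupes the qualifying common suffixes into a dict in pair-discovery order, and computes each distinct suffix's index list with a single scan instead of rescanning all names for every qualifying pair.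
import Mathlib
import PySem

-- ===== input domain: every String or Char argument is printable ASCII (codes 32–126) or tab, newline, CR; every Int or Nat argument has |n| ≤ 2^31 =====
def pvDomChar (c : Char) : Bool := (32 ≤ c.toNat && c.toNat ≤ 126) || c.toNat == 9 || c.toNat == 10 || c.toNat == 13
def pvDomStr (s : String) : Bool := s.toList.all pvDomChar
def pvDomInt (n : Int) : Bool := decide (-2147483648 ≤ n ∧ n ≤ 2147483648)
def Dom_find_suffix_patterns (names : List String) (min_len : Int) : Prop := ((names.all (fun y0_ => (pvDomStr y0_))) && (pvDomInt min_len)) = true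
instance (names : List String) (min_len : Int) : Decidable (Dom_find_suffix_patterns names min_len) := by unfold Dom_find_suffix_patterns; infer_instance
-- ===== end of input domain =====

-- B replaces A's per-pair rescan of all names by deduplicating the qualifying common
-- suffixes first and scanning the names once per distinct suffix (objective: faster).

-- ===== PORT A =====
-- the 'for c1, c2 in zip(reversed(name1), reversed(name2)): if c1 == c2: suffix = c1 + suffix else: break' loop
def pvSuffixLoop : List (Char × Char) → List Char → List Char
  | [], suf => suf
  | (c1, c2) :: rest, suf => if c1 == c2 then pvSuffixLoop rest (c1 :: suf) else suf

def find_suffix_patterns (names : List String) (min_len : Int) : List (String × List Int) :=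
  let groups : PySem.Dict String (List Int) :=
    (PySem.List.enumerate names).foldl (fun d p =>
      (PySem.List.enumerate names).foldl (fun d q =>
        if p.1 ≥ q.1 then d
        else
          let suffix := String.ofList (pvSuffixLoop (p.2.toList.reverse.zip q.2.toList.reverse) [])
          if (PySem.Str.len suffix : Int) ≥ min_len then
            (PySem.List.enumerate names).foldl (fun d r =>
              if PySem.Str.endswith r.2 suffix then
                if r.1 ∈ PySem.Dict.getD d suffix [] then d
                else PySem.Dict.insert d suffix (PySem.Dict.getD d suffix [] ++ [r.1])
              else d) d
          else d) d)
      PySem.Dict.empty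
  groups.items.filter (fun it => decide (it.2.length ≥ 2))

-- ===== PORT B =====
-- _common_suffix_len: count matching leading pairs of zip(reversed(a), reversed(b))
def pvCommonLen : List (Char × Char) → Nat
  | [] => 0
  | (c1, c2) :: rest => if c1 != c2 then 0 else pvCommonLen rest + 1

def find_suffix_patterns_alt (names : List String) (min_len : Int) : List (String × List Int) :=
  let suffixes : PySem.Dict String (Option Unit) :=
    (PySem.List.enumerate names).foldl (fun d p =>
      if (PySem.Str.len p.2 : Int) < min_len then d
      else (PySem.List.slice names (some (p.1 + 1)) none).foldl (fun d name2 =>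
        if (PySem.Str.len name2 : Int) < min_len then d
        else
          let n := pvCommonLen (p.2.toList.reverse.zip name2.toList.reverse)
          if (n : Int) < min_len then d
          else PySem.Dict.insert d (PySem.Str.slice p.2 (some ((PySem.Str.len p.2 : Int) - (n : Int))) none) none) d)
      PySem.Dict.empty
  (PySem.Dict.keys suffixes).foldl (fun acc s =>
    let idx := ((PySem.List.enumerate names).filter (fun r => PySem.Str.endswith r.2 s)).map (·.1)
    if idx.length ≥ 2 then acc ++ [(s, idx)] else acc) []

-- ===== PRECONDITION & SPEC =====
def Spec_find_suffix_patterns (names : List String) (min_len : Int) (out : List (String × List Int)) : Prop := out = find_suffix_patterns_alt names min_len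
instance (names : List String) (min_len : Int) (out : List (String × List Int)) : Decidable (Spec_find_suffix_patterns names min_len out) := by unfold Spec_find_suffix_patterns; infer_instance

-- ===== CLAIM (what is proved, stated in full; the proofs are below) =====
def Claim_equal_find_suffix_patterns : Prop := ∀ (names : List String) (min_len : Int), Dom_find_suffix_patterns names min_len → Spec_find_suffix_patterns names min_len (find_suffix_patterns names min_len)

-- ===== LEMMAS AND PROOFS =====

-- the index list B computes for a suffix s (exactly port B's comprehension)
def pvIdxOf (names : List String) (s : String) : List Int :=
  ((PySem.List.enumerate names).filter (fun r => PySem.Str.endswith r.2 s)).map (·.1)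

-- the common suffix of a pair, in port B's form
def pvSfx (a b : String) : String :=
  PySem.Str.slice a (some ((PySem.Str.len a : Int) - (pvCommonLen (a.toList.reverse.zip b.toList.reverse) : Int))) none

-- A's inner scan over (index, name) pairs
def pvScanL (s : String) (L : List (Int × String)) (d : PySem.Dict String (List Int)) : PySem.Dict String (List Int) :=
  L.foldl (fun d r =>
    if PySem.Str.endswith r.2 s then
      if r.1 ∈ PySem.Dict.getD d s [] then d
      else PySem.Dict.insert d s (PySem.Dict.getD d s [] ++ [r.1])
    else d) d

-- A's per-pair step, with the suffix already computed
def pvStepA (names : List String) (min_len : Int) (d : PySem.Dict String (List Int)) (s : String) : PySem.Dict String (List Int) :=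
  if (PySem.Str.len s : Int) ≥ min_len then pvScanL s (PySem.List.enumerate names) d else d

-- B's per-pair step
def pvStepB (min_len : Int) (d : PySem.Dict String (Option Unit)) (s : String) : PySem.Dict String (Option Unit) :=
  if (PySem.Str.len s : Int) ≥ min_len then PySem.Dict.insert d s none else d

-- the sequence of pair suffixes, in discovery order
def pvS (names : List String) : List String :=
  (PySem.List.enumerate names).flatMap (fun p => ((names.drop (p.1 + 1).toNat).map (fun n2 => pvSfx p.2 n2)))

-- the invariant tying A's groups dict to B's suffix dict
def pvInv (names : List String) (dA : PySem.Dict String (List Int)) (dB : PySem.Dict String (Option Unit)) : Prop :=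
  dB.keys.Nodup ∧ dA.items = dB.keys.map (fun s => (s, pvIdxOf names s))

theorem pvCommonLen_le (zs : List (Char × Char)) : pvCommonLen zs ≤ zs.length := by
  induction zs with
  | nil => simp [pvCommonLen]
  | cons z rest ih =>
    obtain ⟨c1, c2⟩ := z
    simp only [pvCommonLen]
    split
    · simp
    · simp; omega

theorem pvSuffixLoop_eq (ra : List Char) : ∀ (rb acc : List Char),
    pvSuffixLoop (ra.zip rb) acc = (ra.take (pvCommonLen (ra.zip rb))).reverse ++ acc := by
  induction ra with
  | nil => intro rb acc; simp [pvSuffixLoop, pvCommonLen]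
  | cons c1 ra ih =>
    intro rb acc
    cases rb with
    | nil => simp [pvSuffixLoop, pvCommonLen]
    | cons c2 rb =>
      simp only [List.zip_cons_cons, pvSuffixLoop, pvCommonLen]
      by_cases h : c1 = c2
      · simp [h, ih]
      · simp [h]

theorem pvSfx_toList (a b : String) :
    (pvSfx a b).toList = a.toList.drop (a.toList.length - pvCommonLen (a.toList.reverse.zip b.toList.reverse)) := by
  have hle : pvCommonLen (a.toList.reverse.zip b.toList.reverse) ≤ a.toList.length := by
    have h1 := pvCommonLen_le (a.toList.reverse.zip b.toList.reverse)
    rw [List.length_zip, List.length_reverse, List.length_reverse] at h1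
    exact le_trans h1 (min_le_left _ _)
  unfold pvSfx
  simp only [PySem.Str.toList_slice, PySem.Chars.slice_eq_listSlice]
  have h0 : (0:Int) ≤ (PySem.Str.len a : Int) - (pvCommonLen (a.toList.reverse.zip b.toList.reverse) : Int) := by
    rw [PySem.Str.len_eq]; omega
  rw [PySem.List.slice_from _ h0]
  congr 1
  rw [PySem.Str.len_eq]
  omega

theorem pvSuffix_eq (a b : String) :
    String.ofList (pvSuffixLoop (a.toList.reverse.zip b.toList.reverse) []) = pvSfx a b := by
  have hle : pvCommonLen (a.toList.reverse.zip b.toList.reverse) ≤ a.toList.reverse.length := by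
    have h1 := pvCommonLen_le (a.toList.reverse.zip b.toList.reverse)
    rw [List.length_zip] at h1
    exact le_trans h1 (min_le_left _ _)
  have := pvSfx_toList a b
  apply String.toList_injective
  rw [this]
  rw [String.toList_ofList, pvSuffixLoop_eq, List.append_nil, List.take_reverse]
  simp

theorem pvEndswith_sfx (a b : String) : PySem.Str.endswith a (pvSfx a b) = true := by
  rw [PySem.Str.endswith_eq, PySem.Chars.endswith_iff, pvSfx_toList]
  exact List.drop_suffix _ _

theorem pvFoldl_fixed {α β : Type} (l : List α) (f : β → α → β) (d : β)
    (h : ∀ x ∈ l, f d x = d) : l.foldl f d = d := by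
  induction l with
  | nil => rfl
  | cons x l ih =>
    simp only [List.foldl_cons, h x (by simp)]
    exact ih (fun y hy => h y (by simp [hy]))

theorem pvFoldl_enumerate_gt {α β : Type} (F : β → α → β) (i : Int) :
    ∀ (xs : List α) (s : Int) (d : β),
    (PySem.List.enumerate xs s).foldl (fun d q => if i ≥ q.1 then d else F d q.2) d
      = (xs.drop (i + 1 - s).toNat).foldl F d := by
  intro xs
  induction xs with
  | nil => intro s d; simp [PySem.List.enumerate_nil]
  | cons x xs ih =>
    intro s d
    rw [PySem.List.enumerate_cons]
    simp only [List.foldl_cons]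
    by_cases h : i ≥ s
    · rw [if_pos h, ih]
      have : (i + 1 - s).toNat = (i + 1 - (s + 1)).toNat + 1 := by omega
      rw [this, List.drop_succ_cons]
    · rw [if_neg h, ih]
      have h1 : (i + 1 - s).toNat = 0 := by omega
      have h2 : (i + 1 - (s + 1)).toNat = 0 := by omega
      rw [h1, h2, List.drop_zero, List.drop_zero, List.foldl_cons]

theorem pvScanL_noop (s : String) (L : List (Int × String)) (d : PySem.Dict String (List Int))
    (h : ∀ r ∈ L, PySem.Str.endswith r.2 s = true → r.1 ∈ PySem.Dict.getD d s []) :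
    pvScanL s L d = d := by
  apply pvFoldl_fixed
  intro r hr
  by_cases he : PySem.Str.endswith r.2 s = true
  · rw [if_pos he, if_pos (h r hr he)]
  · rw [if_neg he]

theorem pvScanL_fresh (s : String) : ∀ (L : List (Int × String)) (d : PySem.Dict String (List Int)),
    (L.map Prod.fst).Nodup →
    (∀ r ∈ L, r.1 ∉ PySem.Dict.getD d s []) →
    (L.filter (fun r => PySem.Str.endswith r.2 s)) ≠ [] →
    pvScanL s L d = PySem.Dict.insert d s
      (PySem.Dict.getD d s [] ++ (L.filter (fun r => PySem.Str.endswith r.2 s)).map (·.1)) := by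
  intro L
  induction L with
  | nil => intro d _ _ hne; simp at hne
  | cons r L ih =>
    intro d hnd hnotin hne
    rw [List.filter_cons]
    by_cases he : PySem.Str.endswith r.2 s = true
    · rw [if_pos he]
      have hstep : pvScanL s (r :: L) d
          = pvScanL s L (PySem.Dict.insert d s (PySem.Dict.getD d s [] ++ [r.1])) := by
        unfold pvScanL
        rw [List.foldl_cons, if_pos he, if_neg (hnotin r (by simp))]
      rw [hstep]
      have hget : PySem.Dict.getD (PySem.Dict.insert d s (PySem.Dict.getD d s [] ++ [r.1])) s []
          = PySem.Dict.getD d s [] ++ [r.1] := PySem.Dict.getD_insert_self _ _ _ _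
      by_cases hf : (L.filter (fun r => PySem.Str.endswith r.2 s)) = []
      · have hnm : ∀ q ∈ L, PySem.Str.endswith q.2 s = true →
            q.1 ∈ PySem.Dict.getD (PySem.Dict.insert d s (PySem.Dict.getD d s [] ++ [r.1])) s [] := by
          intro q hq hqe
          exfalso
          have hmem : q ∈ L.filter (fun r => PySem.Str.endswith r.2 s) := List.mem_filter.mpr ⟨hq, hqe⟩
          rw [hf] at hmem
          simp at hmem
        rw [pvScanL_noop s L _ hnm, hf]
        simp
      · rw [ih _ (List.nodup_cons.mp hnd).2 ?_ hf]
        · rw [hget, PySem.Dict.insert_insert_self]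
          simp
        · intro q hq
          rw [hget]
          simp only [List.mem_append, List.mem_singleton]
          push Not
          refine ⟨hnotin q (by simp [hq]), ?_⟩
          have hni := (List.nodup_cons.mp hnd).1
          intro hc
          exact hni (hc ▸ List.mem_map_of_mem hq)
    · rw [if_neg he]
      have hstep : pvScanL s (r :: L) d = pvScanL s L d := by
        unfold pvScanL
        rw [List.foldl_cons, if_neg he]
      rw [hstep, ih d (List.nodup_cons.mp hnd).2 (fun q hq => hnotin q (by simp [hq])) ?_]
      rw [List.filter_cons, if_neg he] at hne
      exact hne

theorem pvKeysA {names : List String} {dA : PySem.Dict String (List Int)} {dB : PySem.Dict String (Option Unit)}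
    (h : pvInv names dA dB) : dA.keys = dB.keys := by
  have h2 := h.2
  simp only [PySem.Dict.keys, h2, List.map_map]
  simp

theorem pvNodup_fst_enumerate (names : List String) :
    ((PySem.List.enumerate names).map Prod.fst).Nodup := by
  have hpw := PySem.List.pairwise_lt_enumerate names 0
  have hm : ((PySem.List.enumerate names).map Prod.fst).Pairwise (· < ·) :=
    List.Pairwise.map _ (fun a b h => h) hpw
  exact hm.nodup

theorem pvInv_step (names : List String) (min_len : Int) (s : String)
    (dA : PySem.Dict String (List Int)) (dB : PySem.Dict String (Option Unit))
    (hw : ∃ w, w ∈ names ∧ PySem.Str.endswith w s = true)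
    (h : pvInv names dA dB) :
    pvInv names (pvStepA names min_len dA s) (pvStepB min_len dB s) := by
  unfold pvStepA pvStepB
  by_cases hq : (PySem.Str.len s : Int) ≥ min_len
  · rw [if_pos hq, if_pos hq]
    by_cases hc : PySem.Dict.contains dB s = true
    · -- s is already a key: A's scan is a no-op, B's insert keeps the keys
      have hsk : s ∈ PySem.Dict.keys dB := (PySem.Dict.contains_iff_mem_keys dB s).mp hc
      have hitems : (s, pvIdxOf names s) ∈ dA.items := by
        rw [h.2]; exact List.mem_map_of_mem hsk
      have hAnodup : dA.keys.Nodup := by rw [pvKeysA h]; exact h.1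
      have hget : PySem.Dict.getD dA s [] = pvIdxOf names s :=
        PySem.Dict.getD_of_mem_items dA hitems hAnodup []
      have hscan : pvScanL s (PySem.List.enumerate names) dA = dA := by
        apply pvScanL_noop
        intro r hr hre
        rw [hget]
        unfold pvIdxOf
        exact List.mem_map.mpr ⟨r, List.mem_filter.mpr ⟨hr, hre⟩, rfl⟩
      rw [hscan]
      unfold pvInv
      rw [PySem.Dict.keys_insert_of_contains dB none hc]
      exact h
    · -- fresh suffix: A's scan appends (s, pvIdxOf names s), B appends the key s
      have hcf : PySem.Dict.contains dB s = false := by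
        cases hcc : PySem.Dict.contains dB s
        · rfl
        · exact absurd hcc hc
      have hsk : s ∉ PySem.Dict.keys dB := fun hm =>
        hc ((PySem.Dict.contains_iff_mem_keys dB s).mpr hm)
      have hAcf : PySem.Dict.contains dA s = false := by
        cases hcc : PySem.Dict.contains dA s
        · rfl
        · exfalso
          have hmm : s ∈ dA.keys := (PySem.Dict.contains_iff_mem_keys dA s).mp hcc
          rw [pvKeysA h] at hmm
          exact hsk hmm
      have hgetA : PySem.Dict.getD dA s [] = [] := PySem.Dict.getD_of_not_contains dA [] hAcf
      obtain ⟨w, hwmem, hwend⟩ := hw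
      obtain ⟨k, hk, hwk⟩ := List.mem_iff_getElem.mp hwmem
      have hkmem : ((k : Int), w) ∈ PySem.List.enumerate names := by
        rw [PySem.List.mem_enumerate_iff]
        exact ⟨k, hk, by rw [hwk]; simp⟩
      have hfne : ((PySem.List.enumerate names).filter (fun r => PySem.Str.endswith r.2 s)) ≠ [] := by
        intro hnil
        have : ((k : Int), w) ∈ (PySem.List.enumerate names).filter (fun r => PySem.Str.endswith r.2 s) :=
          List.mem_filter.mpr ⟨hkmem, hwend⟩
        rw [hnil] at this
        simp at this
      have hscan := pvScanL_fresh s (PySem.List.enumerate names) dA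
        (pvNodup_fst_enumerate names) (by intro r hr; rw [hgetA]; simp) hfne
      rw [hscan, hgetA, List.nil_append]
      constructor
      · rw [PySem.Dict.keys_insert_of_not_contains dB none hcf]
        exact List.Nodup.append h.1 (by simp) (by simpa using hsk)
      · rw [PySem.Dict.items_insert_of_not_contains dA _ hAcf,
            PySem.Dict.keys_insert_of_not_contains dB none hcf, List.map_append, ← h.2]
        rfl
  · rw [if_neg hq, if_neg hq]
    exact h

theorem pvInv_fold (names : List String) (min_len : Int) :
    ∀ (S : List String) (dA : PySem.Dict String (List Int)) (dB : PySem.Dict String (Option Unit)),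
    (∀ s ∈ S, ∃ w, w ∈ names ∧ PySem.Str.endswith w s = true) →
    pvInv names dA dB →
    pvInv names (S.foldl (pvStepA names min_len) dA) (S.foldl (pvStepB min_len) dB) := by
  intro S
  induction S with
  | nil => intro dA dB _ h; exact h
  | cons s S ih =>
    intro dA dB hws h
    simp only [List.foldl_cons]
    exact ih _ _ (fun t ht => hws t (by simp [ht]))
      (pvInv_step names min_len s dA dB (hws s (by simp)) h)

theorem pvS_witness (names : List String) :
    ∀ s ∈ pvS names, ∃ w, w ∈ names ∧ PySem.Str.endswith w s = true := by
  intro s hs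
  unfold pvS at hs
  obtain ⟨p, hp, hsp⟩ := List.mem_flatMap.mp hs
  obtain ⟨n2, _, hs2⟩ := List.mem_map.mp hsp
  obtain ⟨k, hk, hpk⟩ := (PySem.List.mem_enumerate_iff names 0 p).mp hp
  refine ⟨p.2, ?_, ?_⟩
  · rw [hpk]; exact List.getElem_mem hk
  · rw [← hs2]; exact pvEndswith_sfx p.2 n2

-- port A's groups dict, as a fold of pvStepA over the pair-suffix sequence
theorem pvA_groups (names : List String) (min_len : Int) :
    ((PySem.List.enumerate names).foldl (fun d p =>
      (PySem.List.enumerate names).foldl (fun d q =>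
        if p.1 ≥ q.1 then d
        else pvStepA names min_len d
          (String.ofList (pvSuffixLoop (p.2.toList.reverse.zip q.2.toList.reverse) []))) d)
      (PySem.Dict.empty : PySem.Dict String (List Int)))
    = (pvS names).foldl (pvStepA names min_len) PySem.Dict.empty := by
  unfold pvS
  rw [List.foldl_flatMap]
  apply PySem.List.foldl_congr_mem
  intro d p _
  rw [pvFoldl_enumerate_gt (fun d n2 =>
        pvStepA names min_len d (String.ofList (pvSuffixLoop (p.2.toList.reverse.zip n2.toList.reverse) []))) p.1 names 0 d]
  rw [List.foldl_map]
  simp only [sub_zero]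
  apply PySem.List.foldl_congr_mem
  intro d' n2 _
  rw [pvSuffix_eq]

theorem pvCommonLen_le_left (ra rb : List Char) : pvCommonLen (ra.zip rb) ≤ ra.length := by
  have h1 := pvCommonLen_le (ra.zip rb)
  rw [List.length_zip] at h1
  exact le_trans h1 (min_le_left _ _)

theorem pvCommonLen_le_right (ra rb : List Char) : pvCommonLen (ra.zip rb) ≤ rb.length := by
  have h1 := pvCommonLen_le (ra.zip rb)
  rw [List.length_zip] at h1
  exact le_trans h1 (min_le_right _ _)

theorem pvSfx_len (a b : String) :
    (PySem.Str.len (pvSfx a b) : Int) = (pvCommonLen (a.toList.reverse.zip b.toList.reverse) : Int) := by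
  have hle : pvCommonLen (a.toList.reverse.zip b.toList.reverse) ≤ a.toList.length := by
    have := pvCommonLen_le_left (a.toList.reverse) (b.toList.reverse)
    rwa [List.length_reverse] at this
  rw [PySem.Str.len_eq, pvSfx_toList, List.length_drop]
  omega

-- port B's suffixes dict, as a fold of pvStepB over the same sequence:
-- B's length pre-filters only drop pairs whose common suffix is too short anyway
theorem pvB_suffixes (names : List String) (min_len : Int) :
    ((PySem.List.enumerate names).foldl (fun d p =>
      if (PySem.Str.len p.2 : Int) < min_len then d
      else (PySem.List.slice names (some (p.1 + 1)) none).foldl (fun d n2 =>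
        if (PySem.Str.len n2 : Int) < min_len then d
        else
          if ((pvCommonLen (p.2.toList.reverse.zip n2.toList.reverse)) : Int) < min_len then d
          else PySem.Dict.insert d
            (PySem.Str.slice p.2 (some ((PySem.Str.len p.2 : Int) - ((pvCommonLen (p.2.toList.reverse.zip n2.toList.reverse)) : Int))) none) none) d)
      (PySem.Dict.empty : PySem.Dict String (Option Unit)))
    = (pvS names).foldl (pvStepB min_len) PySem.Dict.empty := by
  unfold pvS
  rw [List.foldl_flatMap]
  apply PySem.List.foldl_congr_mem
  intro d p hp
  obtain ⟨k, hk, hpk⟩ := (PySem.List.mem_enumerate_iff names 0 p).mp hp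
  have h0 : (0:Int) ≤ p.1 + 1 := by rw [hpk]; simp; omega
  have hstep : ∀ (d : PySem.Dict String (Option Unit)) (n2 : String),
      (PySem.Str.len n2 : Int) < min_len ∨ ¬ (PySem.Str.len p.2 : Int) < min_len →
      (if (PySem.Str.len n2 : Int) < min_len then d
       else
        if ((pvCommonLen (p.2.toList.reverse.zip n2.toList.reverse)) : Int) < min_len then d
        else PySem.Dict.insert d
          (PySem.Str.slice p.2 (some ((PySem.Str.len p.2 : Int) - ((pvCommonLen (p.2.toList.reverse.zip n2.toList.reverse)) : Int))) none) none)
      = pvStepB min_len d (pvSfx p.2 n2) := by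
    intro d n2 _
    unfold pvStepB
    rw [pvSfx_len]
    by_cases h2 : (PySem.Str.len n2 : Int) < min_len
    · have hn2 : (pvCommonLen (p.2.toList.reverse.zip n2.toList.reverse) : Int) < min_len := by
        have hcl := pvCommonLen_le_right (p.2.toList.reverse) (n2.toList.reverse)
        rw [List.length_reverse] at hcl
        rw [PySem.Str.len_eq] at h2
        omega
      rw [if_pos h2, if_neg (by omega)]
    · rw [if_neg h2]
      by_cases h3 : ((pvCommonLen (p.2.toList.reverse.zip n2.toList.reverse)) : Int) < min_len
      · rw [if_pos h3, if_neg (by omega)]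
      · rw [if_neg h3, if_pos (by omega)]
        rfl
  by_cases h1 : (PySem.Str.len p.2 : Int) < min_len
  · rw [if_pos h1, List.foldl_map]
    symm
    apply pvFoldl_fixed
    intro n2 _
    unfold pvStepB
    rw [pvSfx_len]
    have hcl := pvCommonLen_le_left (p.2.toList.reverse) (n2.toList.reverse)
    rw [List.length_reverse] at hcl
    rw [PySem.Str.len_eq] at h1
    rw [if_neg (by omega)]
  · rw [if_neg h1, PySem.List.slice_from _ h0, List.foldl_map]
    apply PySem.List.foldl_congr_mem
    intro d' n2 _
    exact hstep d' n2 (Or.inr h1)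

theorem pvInv_empty (names : List String) :
    pvInv names (PySem.Dict.empty : PySem.Dict String (List Int))
      (PySem.Dict.empty : PySem.Dict String (Option Unit)) := by
  constructor
  · simp [PySem.Dict.keys_empty]
  · simp [PySem.Dict.keys_empty]
    rfl

-- ===== VERDICT (by name: the statement is the Claim_ definition above) =====
theorem find_suffix_patterns_spec : Claim_equal_find_suffix_patterns := by
  unfold Claim_equal_find_suffix_patterns
  intro names min_len _
  unfold Spec_find_suffix_patterns
  have hA : find_suffix_patterns names min_len
      = (((pvS names).foldl (pvStepA names min_len) PySem.Dict.empty).items).filter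
          (fun it => decide (it.2.length ≥ 2)) := by
    rw [← pvA_groups]
    rfl
  have hB : find_suffix_patterns_alt names min_len
      = (PySem.Dict.keys ((pvS names).foldl (pvStepB min_len) PySem.Dict.empty)).foldl
          (fun acc s => if (pvIdxOf names s).length ≥ 2 then acc ++ [(s, pvIdxOf names s)] else acc) [] := by
    rw [← pvB_suffixes]
    rfl
  rw [hA, hB]
  have hinv := pvInv_fold names min_len (pvS names) PySem.Dict.empty PySem.Dict.empty
    (pvS_witness names) (pvInv_empty names)
  rw [hinv.2]
  rw [List.filter_map]
  rw [PySem.List.foldl_append_ite (fun s => (pvIdxOf names s).length ≥ 2)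
        (fun s => (s, pvIdxOf names s))]
  rw [List.nil_append]
  rfl
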